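-- pv_equiv track=rewrite | github.com/GwonPyo/Algorithm | Programmers/Kakao/n_digit game.py | solution
-- ===== SOURCE A (Python) =====
-- def solution(n, t, m, p):
--     # n: 진법, t: 미리 구할 숫자의 갯수, m: 게임 참가 인원, p: 튜브 순서
--
--     answer = ''                            # 출력값을 담을 문자열이다.
--     str_list = ''                          # 모든 사람틀(m)이 t개 이상의 숫자(문자)를 불렀을 때 지금까지 나온 문자를 저장해 놓은 문자열이다.
--
--     count = 0                              # 현재 사람들이 외쳐야할 숫자를 의미한다.
--     while len(str_list) < t*m:
--         str_list += conversion(n, count)   # count를 n진법으로 변환하고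
--         count += 1                         # 다음 숫자를 탐색할 수 있도록 갱신한다.
--
--     count = 0                              # 위에서 생성한 str_list에서 t개의 올바른 문자를 뽑아야 한다.
--     while len(answer) < t:
--         answer += str_list[count*m+p-1]    # 알맞은 인덱스에 접근해서 answer에 넣어준다.
--         count+=1                           # count에 1을 더해서 이후에도 올바른 인덱스에 접근할 수 있게 한다.
--
--     return answer
--
-- def conversion(n, number):
--     result = ''
--     while number >= n:                     # number가 나눠야할 수인 n보다 크거나 같다면 반복문을 수행한다.
--         tmp = number%n                     # number를 n으로 나눴을 때 나머지를 tmp에 저장하고 몫은 number에 저장한다.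
--         number = number//n
--         if tmp < 10:                       # tmp(나머지)가 10보다 작다면 해당 숫자를 문자열로 변환해 result의 맨 앞부분에 저장한다.
--             result = str(tmp)+result
--         else:
--             result = chr(65+tmp-10)+result # tmp(나머지)가 10보다 크다면 올바른 알파벳을 result의 맨 앞부분에 저장한다.
--
--     if number < 10:                        # 마지막으로 number에 저장된 값을 위와 동일한 방식으로 result 맨 앞부분에 추가해준다.
--         result = str(number)+result
--     else:
--         result = chr(65+number-10)+result
--
--     return result
-- ===== SOURCE B (Python) =====
-- def solution(n, t, m, p):
--     # For each needed global position, locate the containing number and digit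
--     # directly from digit-length counts instead of building the whole string.
--     def digit_at(idx):
--         d = 1          # current digit-length
--         start = 0      # first number written with d digits (0 counts as 1-digit)
--         count = n      # how many numbers have d digits
--         total = 0      # characters contributed by all shorter numbers
--         while total + d * count <= idx:
--             total += d * count
--             start += count
--             d += 1
--             count = start * (n - 1)
--         offset = idx - total
--         number = start + offset // d
--         digit = (number // n ** (d - 1 - offset % d)) % n
--         return str(digit) if digit < 10 else chr(55 + digit)
--     return ''.join(digit_at(k * m + p - 1) for k in range(t))
-- ===== Notes on version B (the rewrite author's own statement) =====
-- stated objective: faster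
-- what changed: Instead of materialising the whole concatenated base-n string and indexing into it, B locates, for each of the t needed global positions, the containing number and digit arithmetically from per-digit-length counts.
-- outside the precondition, e.g. on solution(10, 1, 3, -1): A returns '1', B returns '8'; on solution(2, 1, 3, 4): A returns '0', B returns '0'; on solution(60000, 3, 2, 1): A returns '024', B returns '024'
import Mathlib
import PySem

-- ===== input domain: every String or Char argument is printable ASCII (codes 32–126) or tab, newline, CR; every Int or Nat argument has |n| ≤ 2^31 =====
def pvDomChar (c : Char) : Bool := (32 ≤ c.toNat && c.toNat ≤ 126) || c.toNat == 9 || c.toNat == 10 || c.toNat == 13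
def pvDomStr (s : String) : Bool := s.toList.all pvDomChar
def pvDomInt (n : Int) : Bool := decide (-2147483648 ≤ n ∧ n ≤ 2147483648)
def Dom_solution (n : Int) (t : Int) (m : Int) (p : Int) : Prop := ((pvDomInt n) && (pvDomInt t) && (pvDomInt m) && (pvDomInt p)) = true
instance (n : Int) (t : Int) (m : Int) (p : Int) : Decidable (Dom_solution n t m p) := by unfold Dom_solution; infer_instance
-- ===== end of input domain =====

-- B replaces A's "materialise the whole digit string, then index it" (O(t*m)) by directly
-- locating, for each needed global position, the number and digit containing it (O(t*log)).

-- ===== PORT A =====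
-- conversion's while loop; fuel makes the recursion total (enough fuel inside Pre_),
-- the loop body is transliterated step for step.  Python's str is carried as List Char.
def convLoopA (n : Int) (fuel : Nat) (number : Int) (result : List Char) : Int × List Char :=
  match fuel with
  | 0 => (number, result)
  | f + 1 =>
    if n ≤ number then
      let tmp := PySem.Int.mod number n
      let number' := PySem.Int.floordiv number n
      -- chr(65+tmp-10) ported as Char.ofNat: exact for code points below the surrogate
      -- block, which Pre_'s bound n ≤ 55241 guarantees.
      let result' := (if tmp < 10 then PySem.Int.toChars tmp
                      else [Char.ofNat (65 + tmp - 10).toNat]) ++ result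
      convLoopA n f number' result'
    else (number, result)

def convA (n : Int) (number : Int) : List Char :=
  let (num, res) := convLoopA n number.toNat number [] -- fuel: number shrinks each iteration
  (if num < 10 then PySem.Int.toChars num else [Char.ofNat (65 + num - 10).toNat]) ++ res

-- first while loop: build str_list until its length reaches t*m
-- (fuel t*m is enough: every conversion appends at least one character).
-- 'str_list += conversion(...)' is encoded as usual for O(1) amortised appends: the
-- characters are kept in reverse with the length carried alongside, reversed once on exit.
def buildLoopA (n : Int) (tm : Int) (fuel : Nat) (strListRev : List Char) (strLen : Int)
    (count : Int) : List Char :=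
  match fuel with
  | 0 => strListRev.reverse
  | f + 1 =>
    if strLen < tm then
      let chunk := convA n count
      buildLoopA n tm f (chunk.reverse ++ strListRev) (strLen + chunk.length) (count + 1)
    else strListRev.reverse

-- second while loop: pick t characters (fuel t is enough: one character per iteration;
-- where Python would raise IndexError — excluded by Pre_ — pyGet? is none and we skip).
-- 'answer += ...' is encoded with the same reversed accumulator.
def pickLoopA (t : Int) (m : Int) (p : Int) (strList : List Char) (fuel : Nat)
    (answerRev : List Char) (ansLen : Int) (count : Int) : List Char :=
  match fuel with
  | 0 => answerRev.reverse
  | f + 1 =>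
    if ansLen < t then
      match PySem.List.pyGet? strList (count * m + p - 1) with
      | some c => pickLoopA t m p strList f (c :: answerRev) (ansLen + 1) (count + 1)
      | none => pickLoopA t m p strList f answerRev ansLen (count + 1)
    else answerRev.reverse

def solution (n : Int) (t : Int) (m : Int) (p : Int) : String :=
  let strList := buildLoopA n (t * m) (t * m).toNat [] 0 0
  let answer := pickLoopA t m p strList t.toNat [] 0 0
  String.ofList answer

-- ===== PORT B =====
-- digit_at's while loop; fuel makes it total (enough fuel inside Pre_: total grows each round)
def digitAtLoopB (n : Int) (idx : Int) (fuel : Nat)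
    (d start count total : Int) : Int × Int × Int × Int :=
  match fuel with
  | 0 => (d, start, count, total)
  | f + 1 =>
    if total + d * count ≤ idx then
      digitAtLoopB n idx f (d + 1) (start + count) ((start + count) * (n - 1)) (total + d * count)
    else (d, start, count, total)

def digitAtB (n : Int) (idx : Int) : List Char :=
  let (d, start, _count, total) := digitAtLoopB n idx (idx + 1).toNat 1 0 n 0
  let offset := idx - total
  let number := start + PySem.Int.floordiv offset d
  -- n ** (d-1-offset%d): the exponent is nonnegative inside Pre_, so Int `^` on toNat is exact
  let digit := PySem.Int.mod
    (PySem.Int.floordiv number (n ^ (d - 1 - PySem.Int.mod offset d).toNat)) n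
  if digit < 10 then PySem.Int.toChars digit else [Char.ofNat (55 + digit).toNat]

def solution_alt (n : Int) (t : Int) (m : Int) (p : Int) : String :=
  String.ofList ((PySem.List.pyRange 0 t 1).flatMap (fun k => digitAtB n (k * m + p - 1)))

-- ===== PRECONDITION & SPEC =====
-- Pre_ is the problem's natural domain — base 2 ≤ n and player position 1 ≤ p ≤ m — plus all
-- trivially-empty inputs t ≤ 0 on which A returns '' without ever indexing (for those, n ≥ 2 is
-- still needed when t*m > 0, else A's conversion loops forever).  Outside 1 ≤ p ≤ m (with t > 0)
-- A either raises IndexError or reads the built string through Python's accidental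
-- negative-index wraparound.  The bound n ≤ 55241 only excludes inputs whose output would
-- contain chr-codes in Unicode's surrogate block, which a Lean Char/String cannot represent;
-- A and B agree there (both emit chr(55+digit)).
def Pre_solution (n : Int) (t : Int) (m : Int) (p : Int) : Prop :=
  (2 ≤ n ∧ n ≤ 55241 ∧ 1 ≤ p ∧ p ≤ m) ∨ (t ≤ 0 ∧ (t * m ≤ 0 ∨ (2 ≤ n ∧ n ≤ 55241)))
instance (n : Int) (t : Int) (m : Int) (p : Int) : Decidable (Pre_solution n t m p) := by
  unfold Pre_solution; infer_instance

def pvWitness_solution : Int × Int × Int × Int := (2, 3, 2, 1)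

def Spec_solution (n : Int) (t : Int) (m : Int) (p : Int) (out : String) : Prop := out = solution_alt n t m p
instance (n : Int) (t : Int) (m : Int) (p : Int) (out : String) : Decidable (Spec_solution n t m p out) := by unfold Spec_solution; infer_instance

-- ===== CLAIM (what is proved, stated in full; the proofs are below) =====
def Claim_equal_solution : Prop := ∀ (n : Int) (t : Int) (m : Int) (p : Int), Dom_solution n t m p → Pre_solution n t m p → Spec_solution n t m p (solution n t m p)

-- ===== LEMMAS AND PROOFS =====

-- the character written for digit value d (0-9 then A,B,…)
def dchar (d : Nat) : Char := if d < 10 then Char.ofNat (48 + d) else Char.ofNat (55 + d)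

-- canonical base-N digit string of x (most significant first), as both programs write it
def repR (N : Nat) (x : Nat) : List Char :=
  if h : N ≤ x ∧ 2 ≤ N then repR N (x / N) ++ [dchar (x % N)] else [dchar x]
decreasing_by exact Nat.div_lt_self (by omega) (by omega)

-- the stream prefix: concatenation of the digit strings of 0,…,K-1
def streamS (N : Nat) (K : Nat) : List Char := (List.range K).flatMap (repR N)

-- the idx-th character of the infinite concatenation
def charM (N : Nat) (i : Nat) : Char := (streamS N (i + 1)).getD i '?'

theorem repR_base {N x : Nat} (h : x < N) : repR N x = [dchar x] := by
  rw [repR]; simp [Nat.not_le.mpr h]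

theorem repR_step {N x : Nat} (hN : 2 ≤ N) (h : N ≤ x) :
    repR N x = repR N (x / N) ++ [dchar (x % N)] := by
  rw [repR]; simp [h, hN]

theorem repR_ne_nil {N x : Nat} : repR N x ≠ [] := by
  rw [repR]; split <;> simp

theorem len_repR {N : Nat} (hN : 2 ≤ N) (x : Nat) :
    (repR N x).length = Nat.log N x + 1 := by
  induction x using Nat.strong_induction_on with
  | _ x ih =>
    by_cases h : N ≤ x
    · rw [repR_step hN h]
      have hx : x / N < x := Nat.div_lt_self (by omega) (by omega)
      have hlog : 0 < Nat.log N x := Nat.log_pos (by omega) h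
      have := Nat.log_div_base N x
      simp [ih _ hx]
      omega
    · rw [repR_base (Nat.not_le.mp h)]
      simp [Nat.log_eq_zero_iff.mpr (Or.inl (Nat.not_le.mp h))]

theorem getElem_repR {N : Nat} (hN : 2 ≤ N) (x j : Nat) (hj : j < (repR N x).length) :
    (repR N x)[j] = dchar (x / N ^ ((repR N x).length - 1 - j) % N) := by
  induction x using Nat.strong_induction_on generalizing j with
  | _ x ih =>
    by_cases h : N ≤ x
    · have hx : x / N < x := Nat.div_lt_self (by omega) (by omega)
      simp only [repR_step hN h] at hj ⊢
      have hL : (repR N (x / N) ++ [dchar (x % N)]).length = (repR N (x / N)).length + 1 := by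
        simp
      rcases Nat.lt_or_ge j (repR N (x / N)).length with hjl | hjr
      · rw [List.getElem_append_left hjl, ih _ hx j hjl]
        have harith : (repR N (x / N) ++ [dchar (x % N)]).length - 1 - j
            = ((repR N (x / N)).length - 1 - j) + 1 := by simp; omega
        rw [harith]
        congr 1
        rw [pow_succ']
        rw [Nat.div_div_eq_div_mul]
      · have hje : j = (repR N (x / N)).length := by simp at hj; omega
        subst hje
        rw [List.getElem_append_right (Nat.le_refl _)]
        simp
    · have hlt := Nat.not_le.mp h
      simp only [repR_base hlt] at hj ⊢
      have : j = 0 := by simp at hj; omega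
      subst this
      simp [Nat.mod_eq_of_lt hlt]

theorem streamS_succ {N K : Nat} : streamS N (K + 1) = streamS N K ++ repR N K := by
  simp [streamS, List.range_succ]

theorem streamS_prefix {N : Nat} {K K' : Nat} (h : K ≤ K') :
    (streamS N K).IsPrefix (streamS N K') := by
  induction K' with
  | zero => have : K = 0 := by omega
            subst this; exact List.prefix_refl _
  | succ K' ih =>
    rcases Nat.lt_or_ge K (K' + 1) with h1 | h2
    · exact (ih (by omega)).trans ⟨repR N K', (streamS_succ).symm⟩
    · have : K = K' + 1 := by omega
      subst this; exact List.prefix_refl _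

theorem le_len_streamS {N : Nat} (K : Nat) : K ≤ (streamS N K).length := by
  induction K with
  | zero => simp [streamS]
  | succ K ih =>
    rw [streamS_succ]
    have := List.length_pos_iff.mpr (repR_ne_nil (N := N) (x := K))
    simp; omega

theorem len_streamS_lt {N K i : Nat} (h : i < K) : i < (streamS N K).length :=
  Nat.lt_of_lt_of_le h (le_len_streamS K)

theorem charM_spec {N : Nat} {K i : Nat} (hi : i < (streamS N K).length) :
    (streamS N K).getD i '?' = charM N i := by
  unfold charM
  rcases le_total K (i + 1) with h | h
  · obtain ⟨tl, heq⟩ := streamS_prefix (N := N) h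
    rw [← heq, List.getD_append _ _ _ _ hi]
  · obtain ⟨tl, heq⟩ := streamS_prefix (N := N) h
    rw [← heq, List.getD_append]
    exact len_streamS_lt (by omega)

theorem charM_block {N : Nat} (k j : Nat) (hj : j < (repR N k).length) :
    charM N ((streamS N k).length + j) = (repR N k)[j] := by
  have h1 : (streamS N k).length + j < (streamS N (k + 1)).length := by
    rw [streamS_succ]; simp; omega
  rw [← charM_spec h1, streamS_succ]
  have : (streamS N k ++ repR N k).getD ((streamS N k).length + j) '?' = (repR N k).getD j '?' := by
    simp [List.getD, List.getElem?_append_right]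
  rw [this, List.getD_eq_getElem _ _ hj]

-- ---------- digit characters ----------

theorem toChars_digit (d : Nat) (h : d < 10) : PySem.Int.toChars (d : Int) = [dchar d] := by
  interval_cases d <;> decide

theorem charA_eq (d : Nat) :
    (if (d : Int) < 10 then PySem.Int.toChars (d : Int)
     else [Char.ofNat (65 + (d : Int) - 10).toNat]) = [dchar d] := by
  by_cases h : d < 10
  · rw [if_pos (by exact_mod_cast h), toChars_digit d h]
  · rw [if_neg (by exact_mod_cast h)]
    have h1 : (65 + (d : Int) - 10).toNat = 55 + d := by omega
    rw [h1]; unfold dchar; rw [if_neg (by omega)]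

theorem charB_eq (d : Nat) :
    (if (d : Int) < 10 then PySem.Int.toChars (d : Int)
     else [Char.ofNat (55 + (d : Int)).toNat]) = [dchar d] := by
  by_cases h : d < 10
  · rw [if_pos (by exact_mod_cast h), toChars_digit d h]
  · rw [if_neg (by exact_mod_cast h)]
    have h1 : (55 + (d : Int)).toNat = 55 + d := by omega
    rw [h1]; unfold dchar; rw [if_neg (by omega)]

-- ---------- A side: conversion ----------

def leadN (N : Nat) (x : Nat) : Nat :=
  if h : N ≤ x ∧ 2 ≤ N then leadN N (x / N) else x
decreasing_by exact Nat.div_lt_self (by omega) (by omega)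

def lowD (N : Nat) (x : Nat) : List Char :=
  if h : N ≤ x ∧ 2 ≤ N then lowD N (x / N) ++ [dchar (x % N)] else []
decreasing_by exact Nat.div_lt_self (by omega) (by omega)

theorem leadN_base {N x : Nat} (h : x < N) : leadN N x = x := by
  rw [leadN]; simp [Nat.not_le.mpr h]

theorem leadN_step {N x : Nat} (hN : 2 ≤ N) (h : N ≤ x) : leadN N x = leadN N (x / N) := by
  rw [leadN]; simp [h, hN]

theorem lowD_base {N x : Nat} (h : x < N) : lowD N x = [] := by
  rw [lowD]; simp [Nat.not_le.mpr h]

theorem lowD_step {N x : Nat} (hN : 2 ≤ N) (h : N ≤ x) :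
    lowD N x = lowD N (x / N) ++ [dchar (x % N)] := by
  rw [lowD]; simp [h, hN]

theorem repR_lead_low {N : Nat} (hN : 2 ≤ N) (x : Nat) :
    repR N x = dchar (leadN N x) :: lowD N x := by
  induction x using Nat.strong_induction_on with
  | _ x ih =>
    by_cases h : N ≤ x
    · have hx : x / N < x := Nat.div_lt_self (by omega) (by omega)
      rw [repR_step hN h, leadN_step hN h, lowD_step hN h, ih _ hx]
      simp
    · rw [repR_base (Nat.not_le.mp h), leadN_base (Nat.not_le.mp h),
        lowD_base (Nat.not_le.mp h)]

theorem convLoop_eq {N : Nat} (hN : 2 ≤ N) :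
    ∀ (fuel : Nat) (x : Nat) (acc : List Char), x ≤ fuel →
    convLoopA (N : Int) fuel (x : Int) acc = ((leadN N x : Int), lowD N x ++ acc) := by
  intro fuel
  induction fuel with
  | zero =>
    intro x acc hx
    have hx0 : x = 0 := by omega
    subst hx0
    simp [convLoopA, leadN_base (show 0 < N by omega), lowD_base (show 0 < N by omega)]
  | succ f ih =>
    intro x acc hx
    by_cases h : N ≤ x
    · have hxpos : 0 < x := by omega
      have hdivlt : x / N < x := Nat.div_lt_self (by omega) (by omega)
      simp only [convLoopA]
      rw [if_pos (by exact_mod_cast h)]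
      rw [show PySem.Int.mod (x : Int) (N : Int) = ((x % N : Nat) : Int) from
        PySem.Int.mod_natCast x N]
      rw [show PySem.Int.floordiv (x : Int) (N : Int) = ((x / N : Nat) : Int) from
        PySem.Int.floordiv_natCast x N]
      rw [charA_eq (x % N)]
      rw [ih (x / N) _ (by omega)]
      rw [leadN_step hN h, lowD_step hN h]
      simp

    · simp only [convLoopA]
      rw [if_neg (by exact_mod_cast h)]
      rw [leadN_base (Nat.not_le.mp h), lowD_base (Nat.not_le.mp h)]
      simp

theorem convA_eq {N : Nat} (hN : 2 ≤ N) (x : Nat) :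
    convA (N : Int) (x : Int) = repR N x := by
  unfold convA
  rw [show ((x : Int)).toNat = x from Int.toNat_natCast x]
  rw [convLoop_eq hN x x [] (Nat.le_refl x)]
  simp only
  rw [List.append_nil, charA_eq (leadN N x), repR_lead_low hN x]
  rfl

-- ---------- A side: building str_list ----------

theorem build_spec {N : Nat} (hN : 2 ≤ N) (tm : Int) :
    ∀ (fuel : Nat) (k : Nat), ∃ K, k ≤ K ∧
      buildLoopA (N : Int) tm fuel (streamS N k).reverse ((streamS N k).length : Int) (k : Int)
        = streamS N K ∧
      min tm (((streamS N k).length : Int) + fuel) ≤ ((streamS N K).length : Int) := by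
  intro fuel
  induction fuel with
  | zero =>
    intro k
    exact ⟨k, Nat.le_refl k, by simp [buildLoopA], by omega⟩
  | succ f ih =>
    intro k
    by_cases h : ((streamS N k).length : Int) < tm
    · have hchunk : convA (N : Int) (k : Int) = repR N k := convA_eq hN k
      have hrev : (repR N k).reverse ++ (streamS N k).reverse = (streamS N (k + 1)).reverse := by
        rw [streamS_succ, List.reverse_append]
      have hlen1 : ((streamS N k).length : Int) + ((repR N k).length : Int)
          = ((streamS N (k + 1)).length : Int) := by
        rw [streamS_succ]
        simp
      obtain ⟨K, hkK, heq, hlen⟩ := ih (k + 1)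
      refine ⟨K, by omega, ?_, ?_⟩
      · simp only [buildLoopA]
        rw [if_pos h]
        rw [hchunk, hrev, hlen1,
          show (k : Int) + 1 = ((k + 1 : Nat) : Int) by push_cast; ring]
        exact heq
      · have h1 : (streamS N k).length + 1 ≤ (streamS N (k + 1)).length := by
          rw [streamS_succ]
          have := List.length_pos_iff.mpr (repR_ne_nil (N := N) (x := k))
          simp; omega
        omega
    · refine ⟨k, Nat.le_refl k, ?_, by omega⟩
      simp only [buildLoopA]
      rw [if_neg h]
      exact List.reverse_reverse _

-- ---------- A side: picking characters ----------

theorem pick_spec {N : Nat} {t m p : Int} (hp1 : 1 ≤ p) (hpm : p ≤ m)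
    {l : List Char} (hlen : t * m ≤ (l.length : Int))
    (hchar : ∀ i : Nat, (i : Int) < t * m → l.getD i '?' = charM N i) :
    ∀ (fuel : Nat) (c : Int) (accRev : List Char), 0 ≤ c →
      fuel = (t - c).toNat →
      pickLoopA t m p l fuel accRev c c =
        accRev.reverse ++ (PySem.List.pyRange c t 1).flatMap
          (fun k => [charM N (k * m + p - 1).toNat]) := by
  intro fuel
  induction fuel with
  | zero =>
    intro c accRev hc hfuel
    have hct : t ≤ c := by omega
    rw [PySem.List.pyRange_one_eq_nil hct]
    simp [pickLoopA]
  | succ f ih =>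
    intro c accRev hc hfuel
    have hct : c < t := by omega
    have hm1 : 1 ≤ m := le_trans hp1 hpm
    set idx : Int := c * m + p - 1 with hidx_def
    have hidx0 : 0 ≤ idx := by
      have : 0 ≤ c * m := mul_nonneg hc (by omega)
      omega
    have hidxlt : idx < t * m := by
      have h1 : (c + 1) * m ≤ t * m :=
        mul_le_mul_of_nonneg_right (by omega) (by omega)
      have h2 : (c + 1) * m = c * m + m := by ring
      omega
    have hidxlen : idx.toNat < l.length := by omega
    have hget : PySem.List.pyGet? l idx = some (l.getD idx.toNat '?') := by
      rw [PySem.List.pyGet?_eq_some_getElem l hidx0 (by omega),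
        List.getD_eq_getElem l '?' hidxlen]
    have hchar' : l.getD idx.toNat '?' = charM N idx.toNat :=
      hchar idx.toNat (by omega)
    simp only [pickLoopA]
    rw [if_pos (by omega), hget]
    simp only [hchar']
    rw [ih (c + 1) (charM N idx.toNat :: accRev) (by omega) (by omega)]
    rw [PySem.List.pyRange_one_cons hct]
    simp [hidx_def]

-- ---------- B side: digit-length boundaries ----------

def bnd (N d : Nat) : Nat := if d ≤ 1 then 0 else N ^ (d - 1)

theorem bnd_one {N : Nat} : bnd N 1 = 0 := rfl

theorem bnd_succ {N : Nat} {d : Nat} (hd : 1 ≤ d) : bnd N (d + 1) = N ^ d := by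
  unfold bnd; rw [if_neg (by omega)]; simp

theorem bnd_mono {N d : Nat} (hN : 2 ≤ N) (hd : 1 ≤ d) : bnd N d ≤ bnd N (d + 1) := by
  rcases Nat.eq_or_lt_of_le hd with h | h
  · rw [← h]; simp [bnd_one, bnd_succ]
  · rw [bnd_succ hd, show bnd N d = N ^ (d - 1) from by unfold bnd; rw [if_neg (by omega)]]
    exact Nat.pow_le_pow_right (by omega) (by omega)

theorem bnd_lt {N d : Nat} (hN : 2 ≤ N) (hd : 1 ≤ d) : bnd N d < bnd N (d + 1) := by
  rcases Nat.eq_or_lt_of_le hd with h | h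
  · rw [← h]; simp [bnd_one, bnd_succ]; omega
  · rw [bnd_succ hd, show bnd N d = N ^ (d - 1) from by unfold bnd; rw [if_neg (by omega)]]
    exact Nat.pow_lt_pow_right (by omega) (by omega)

theorem len_repR_of_bnd {N d x : Nat} (hN : 2 ≤ N) (hd : 1 ≤ d)
    (h1 : bnd N d ≤ x) (h2 : x < bnd N (d + 1)) : (repR N x).length = d := by
  rw [len_repR hN]
  rcases Nat.eq_or_lt_of_le hd with h | h
  · rw [← h] at h2 ⊢
    rw [bnd_succ (by omega), pow_one] at h2
    rw [Nat.log_eq_zero_iff.mpr (Or.inl h2)]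
  · have hb : bnd N d = N ^ (d - 1) := by unfold bnd; rw [if_neg (by omega)]
    rw [hb] at h1
    rw [bnd_succ hd] at h2
    have : Nat.log N x = d - 1 :=
      Nat.log_eq_of_pow_le_of_lt_pow h1 (by rw [Nat.sub_add_cancel (by omega)]; exact h2)
    omega

theorem lenS_add {N d : Nat} (hN : 2 ≤ N) (hd : 1 ≤ d) :
    ∀ q, q ≤ bnd N (d + 1) - bnd N d →
      (streamS N (bnd N d + q)).length = (streamS N (bnd N d)).length + q * d := by
  intro q
  induction q with
  | zero => simp
  | succ q ih =>
    intro hq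
    rw [show bnd N d + (q + 1) = (bnd N d + q) + 1 from by omega, streamS_succ]
    have hlt : bnd N d + q < bnd N (d + 1) := by
      have := bnd_mono (N := N) hN hd
      omega
    rw [List.length_append, ih (by omega),
      len_repR_of_bnd hN hd (by omega) hlt]
    ring

-- ---------- B side: the locating loop ----------

theorem digitLoop_spec {N : Nat} (hN : 2 ≤ N) {idx : Int} :
    ∀ (fuel : Nat) (d : Nat), 1 ≤ d →
      ((streamS N (bnd N d)).length : Int) ≤ idx →
      (idx - ((streamS N (bnd N d)).length : Int) + 1).toNat ≤ fuel →
      ∃ d' : Nat, 1 ≤ d' ∧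
        digitAtLoopB (N : Int) idx fuel (d : Int) ((bnd N d : Nat) : Int)
          (((bnd N (d + 1) - bnd N d : Nat) : Int)) ((streamS N (bnd N d)).length : Int)
        = ((d' : Int), ((bnd N d' : Nat) : Int), ((bnd N (d' + 1) - bnd N d' : Nat) : Int),
            ((streamS N (bnd N d')).length : Int)) ∧
        ((streamS N (bnd N d')).length : Int) ≤ idx ∧
        idx < ((streamS N (bnd N d')).length : Int)
              + (d' : Int) * ((bnd N (d' + 1) - bnd N d' : Nat) : Int) := by
  intro fuel
  induction fuel with
  | zero =>
    intro d hd htot hfuel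
    omega
  | succ f ih =>
    intro d hd htot hfuel
    have hcnt : 1 ≤ bnd N (d + 1) - bnd N d := by
      have := bnd_lt (N := N) hN hd
      omega
    by_cases h : ((streamS N (bnd N d)).length : Int)
        + (d : Int) * ((bnd N (d + 1) - bnd N d : Nat) : Int) ≤ idx
    · -- one more round
      have hnewstart : ((bnd N d : Nat) : Int) + ((bnd N (d + 1) - bnd N d : Nat) : Int)
          = ((bnd N (d + 1) : Nat) : Int) := by
        have := bnd_mono (N := N) hN hd
        push_cast [Nat.cast_sub this]
        ring
      have hnewcount : ((bnd N (d + 1) : Nat) : Int) * ((N : Int) - 1)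
          = ((bnd N (d + 1 + 1) - bnd N (d + 1) : Nat) : Int) := by
        rw [bnd_succ hd, show bnd N (d + 1 + 1) = N ^ (d + 1) from bnd_succ (by omega)]
        have hle : N ^ d ≤ N ^ (d + 1) := Nat.pow_le_pow_right (by omega) (by omega)
        push_cast [Nat.cast_sub hle]
        ring
      have hnewtotal : ((streamS N (bnd N d)).length : Int)
          + (d : Int) * ((bnd N (d + 1) - bnd N d : Nat) : Int)
          = ((streamS N (bnd N (d + 1))).length : Int) := by
        have h1 := lenS_add (N := N) hN hd (bnd N (d + 1) - bnd N d) (Nat.le_refl _)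
        have h2 : bnd N d + (bnd N (d + 1) - bnd N d) = bnd N (d + 1) := by
          have := bnd_mono (N := N) hN hd
          omega
        rw [h2] at h1
        rw [h1]
        push_cast
        ring
      obtain ⟨d', hd', heq, h1, h2⟩ := ih (d + 1) (by omega)
        (by rw [← hnewtotal]; exact h)
        (by
          have hpos : 1 ≤ (d : Int) * ((bnd N (d + 1) - bnd N d : Nat) : Int) := by
            have : (1 : Int) * 1 ≤ (d : Int) * ((bnd N (d + 1) - bnd N d : Nat) : Int) :=
              mul_le_mul (by exact_mod_cast hd) (by exact_mod_cast hcnt) (by omega)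
                (by positivity)
            omega
          omega)
      refine ⟨d', hd', ?_, h1, h2⟩
      simp only [digitAtLoopB]
      rw [if_pos h]
      rw [hnewstart, hnewcount, hnewtotal,
        show (d : Int) + 1 = ((d + 1 : Nat) : Int) by push_cast; ring]
      exact heq
    · refine ⟨d, hd, ?_, htot, by omega⟩
      simp only [digitAtLoopB]
      rw [if_neg h]

theorem digitAtB_eq {N : Nat} (hN : 2 ≤ N) (idx : Nat) :
    digitAtB (N : Int) (idx : Int) = [charM N idx] := by
  obtain ⟨d', hd', heq, htot, hlt⟩ := digitLoop_spec (N := N) hN (idx := (idx : Int))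
    ((idx : Int) + 1).toNat 1 (Nat.le_refl 1)
    (by simp [bnd_one, streamS]) (by simp [bnd_one, streamS])
  have hsimp : (streamS N (bnd N 1)).length = 0 := by simp [bnd_one, streamS]
  have hcnt1 : bnd N (1 + 1) - bnd N 1 = N := by simp [bnd_one, bnd_succ (Nat.le_refl 1)]
  rw [hsimp, hcnt1, bnd_one] at heq
  push_cast at heq
  unfold digitAtB
  rw [heq]
  simp only
  -- name the exit state
  set T := (streamS N (bnd N d')).length with hT
  set cnt := bnd N (d' + 1) - bnd N d' with hcnt
  have hTle : T ≤ idx := by exact_mod_cast htot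
  set offN := idx - T with hoffN
  have hoff : (idx : Int) - (T : Int) = (offN : Int) := by omega
  have hdpos : 0 < d' := hd'
  have hofflt : offN < d' * cnt := by
    have : (idx : Int) < (T : Int) + (d' : Int) * (cnt : Int) := hlt
    have h2 : (offN : Int) < (d' : Int) * (cnt : Int) := by omega
    exact_mod_cast h2
  have hq : offN / d' < cnt := by
    rw [Nat.div_lt_iff_lt_mul hdpos]
    exact lt_of_lt_of_eq hofflt (Nat.mul_comm d' cnt)
  have hj : offN % d' < d' := Nat.mod_lt _ hdpos
  -- reduce the port's Int arithmetic to Nat arithmetic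
  rw [hoff,
    show PySem.Int.floordiv (offN : Int) (d' : Int) = ((offN / d' : Nat) : Int) from
      PySem.Int.floordiv_natCast offN d',
    show PySem.Int.mod (offN : Int) (d' : Int) = ((offN % d' : Nat) : Int) from
      PySem.Int.mod_natCast offN d']
  rw [show ((d' : Int) - 1 - ((offN % d' : Nat) : Int)).toNat = d' - 1 - offN % d' by omega]
  rw [show ((bnd N d' : Nat) : Int) + ((offN / d' : Nat) : Int)
      = ((bnd N d' + offN / d' : Nat) : Int) by push_cast; ring]
  rw [show ((N : Int)) ^ (d' - 1 - offN % d') = ((N ^ (d' - 1 - offN % d') : Nat) : Int) by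
    push_cast; ring]
  rw [show PySem.Int.floordiv ((bnd N d' + offN / d' : Nat) : Int)
        ((N ^ (d' - 1 - offN % d') : Nat) : Int)
      = (((bnd N d' + offN / d') / N ^ (d' - 1 - offN % d') : Nat) : Int) from
      PySem.Int.floordiv_natCast _ _]
  rw [show PySem.Int.mod (((bnd N d' + offN / d') / N ^ (d' - 1 - offN % d') : Nat) : Int)
        ((N : Nat) : Int)
      = (((bnd N d' + offN / d') / N ^ (d' - 1 - offN % d') % N : Nat) : Int) from
      PySem.Int.mod_natCast _ _]
  rw [charB_eq ((bnd N d' + offN / d') / N ^ (d' - 1 - offN % d') % N)]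
  -- now compute charM at idx
  have hq' : offN / d' < bnd N (d' + 1) - bnd N d' := hcnt ▸ hq
  have hxlt : bnd N d' + offN / d' < bnd N (d' + 1) := by
    have := bnd_mono (N := N) hN hd'
    omega
  have hlenx : (repR N (bnd N d' + offN / d')).length = d' :=
    len_repR_of_bnd hN hd' (Nat.le_add_right _ _) hxlt
  have hLS : (streamS N (bnd N d' + offN / d')).length = T + (offN / d') * d' :=
    lenS_add hN hd' (offN / d') (Nat.le_of_lt hq)
  have hidx_eq : idx = (streamS N (bnd N d' + offN / d')).length + offN % d' := by
    rw [hLS]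
    have h1 := Nat.div_add_mod offN d'
    have h2 : (offN / d') * d' = d' * (offN / d') := Nat.mul_comm _ _
    omega
  rw [hidx_eq, charM_block _ _ (by rw [hlenx]; exact hj)]
  rw [getElem_repR hN _ _ (by rw [hlenx]; exact hj)]
  rw [hlenx]

-- ===== VERDICT (by name: the statement is the Claim_ definition above) =====
theorem solution_spec : Claim_equal_solution := by
  intro n t m p _hDom hPre
  unfold Spec_solution solution solution_alt
  dsimp only
  by_cases ht : t ≤ 0
  · rw [show t.toNat = 0 by omega]
    simp only [pickLoopA]
    rw [PySem.List.pyRange_one_eq_nil ht]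
    simp
  · rw [not_le] at ht
    have hPre' : 2 ≤ n ∧ n ≤ 55241 ∧ 1 ≤ p ∧ p ≤ m := by
      rcases hPre with h | h
      · exact h
      · omega
    obtain ⟨hn2, _hn5, hp1, hpm⟩ := hPre'
    have hm1 : 1 ≤ m := le_trans hp1 hpm
    have hn : n = ((n.toNat : Nat) : Int) := by omega
    have hN : 2 ≤ n.toNat := by omega
    rw [hn]
    have htm : 1 ≤ t * m := by
      have h := mul_pos (show (0 : Int) < t by omega) (show (0 : Int) < m by omega)
      omega
    obtain ⟨K, _hK0, hbuild, hlen⟩ := build_spec (N := n.toNat) hN (t * m) (t * m).toNat 0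
    push_cast at hbuild
    rw [show (streamS n.toNat 0).reverse = ([] : List Char) from rfl,
      show ((streamS n.toNat 0).length : Int) = 0 from rfl] at hbuild
    rw [hbuild]
    have hlen' : t * m ≤ ((streamS n.toNat K).length : Int) := by
      have h0 : (streamS n.toNat 0).length = 0 := rfl
      rw [h0] at hlen
      omega
    have hcharfn : ∀ i : Nat, (i : Int) < t * m →
        (streamS n.toNat K).getD i '?' = charM n.toNat i := by
      intro i hi
      exact charM_spec (by omega)
    rw [pick_spec hp1 hpm hlen' hcharfn t.toNat 0 [] (by omega) (by omega)]
    simp only [List.reverse_nil, List.nil_append]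
    congr 1
    apply List.flatMap_congr
    intro k hk
    rw [PySem.List.mem_pyRange_one] at hk
    have hk0 : 0 ≤ k * m + p - 1 := by
      have : 0 ≤ k * m := mul_nonneg hk.1 (by omega)
      omega
    have hd := digitAtB_eq hN (k * m + p - 1).toNat
    rw [show (((k * m + p - 1).toNat : Nat) : Int) = k * m + p - 1 by omega] at hd
    exact hd.symm
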